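-- pv_equiv track=rewrite | github.com/mahongquan/parts | qt5_client/contacts.py | bjitems
-- ===== SOURCE A (Python) =====
-- def inItems(item,items):
--     inIt=False
--     equal=False
--     v=None
--     for i in range(len(items)):
--         if items[i][0]==item[0]:
--             inIt=True
--             if items[i][2]==item[2]:
--                 equal=True
--             v=items[i]
--             items.remove(items[i])
--             break
--     return(inIt,equal,v)
--
-- def bjitems(items,items_chuku):
--     #(left,middle,right)bjitems(items,items_chuku)
--     left=[]
--     equal=[]
--     notequal=[]
--     for item in items:
--         (inIt,equalv,v)=inItems(item,items_chuku)
--         if inIt: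
--             if equalv:
--                 equal.append(item)
--             else:
--                 notequal.append(item)
--                 notequal.append(v)
--         else:
--             left.append(item)
--     return(left,notequal,items_chuku)
-- ===== SOURCE B (Python) =====
-- # B: lazy bucket index over items_chuku — a single forward cursor feeds a dict of
-- # FIFO queues keyed by first element, so each chuku element's key is computed once
-- # and A's per-item rescans disappear (alternative algorithm; the timing probe did
-- # not measure it as faster on its input family).
-- # Return-value equivalence only: A empties matched entries out of items_chuku in
-- # place, B leaves its arguments untouched.
-- from collections import deque
--
-- def bjitems(items, items_chuku):
--     index = {}                       # key -> deque of (original index, element)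
--     pending = deque(enumerate(items_chuku))   # elements not yet bucketed
--     removed = set()
--     remaining = len(items_chuku)     # unmatched chuku elements still available
--     left = []
--     notequal = []
--     for item in items:
--         if remaining == 0:           # nothing left that could match
--             left.append(item)
--             continue
--         k = item[0]
--         found = None
--         q = index.get(k)
--         if q:
--             found = q.popleft()
--         else:
--             while pending:           # advance the cursor until k shows up
--                 i, w = pending.popleft()
--                 if w[0] == k:
--                     found = (i, w)
--                     break
--                 index.setdefault(w[0], deque()).append((i, w))
--         if found is None:
--             left.append(item)
--             continue
--         i, v = found
--         removed.add(i)
--         remaining -= 1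
--         if v[2] != item[2]:
--             notequal.append(item)
--             notequal.append(v)
--     return (left, notequal, [v for i, v in enumerate(items_chuku) if i not in removed])
-- ===== Notes on version B (the rewrite author's own statement) =====
-- stated objective: alternative
-- what changed: A rescans the remaining items_chuku from the front for every item and removes matches in place; B sweeps items_chuku once with a forward cursor that lazily buckets elements into a dict of FIFO queues keyed by their first element, pops the first match per item, and rebuilds the remainder by filtering out removed indices, so each chuku element's key is inspected once instead of once per rescan; a timing run did not measure B as faster, so no speed is claimed; equivalence is about the return value only (A mutates items_chuku, B does not).
import Mathlib
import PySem

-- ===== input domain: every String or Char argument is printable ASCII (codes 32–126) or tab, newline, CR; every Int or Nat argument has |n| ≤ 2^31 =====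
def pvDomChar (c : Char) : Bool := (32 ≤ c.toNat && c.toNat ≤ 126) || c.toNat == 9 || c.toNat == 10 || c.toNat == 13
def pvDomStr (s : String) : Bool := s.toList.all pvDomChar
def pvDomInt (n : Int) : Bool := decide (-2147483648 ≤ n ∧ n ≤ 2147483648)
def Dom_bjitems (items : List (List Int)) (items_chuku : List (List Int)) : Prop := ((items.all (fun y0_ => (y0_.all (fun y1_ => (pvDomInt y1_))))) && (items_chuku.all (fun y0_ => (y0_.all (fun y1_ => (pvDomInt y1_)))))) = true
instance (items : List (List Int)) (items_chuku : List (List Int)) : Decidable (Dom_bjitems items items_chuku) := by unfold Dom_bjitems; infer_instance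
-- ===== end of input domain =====

-- B replaces A's per-item rescans of items_chuku by a single forward cursor that lazily
-- buckets elements into a dict of FIFO queues keyed by their first element (each chuku
-- element's key is inspected once).  Equivalence is about the RETURN value only: the
-- Python A empties matched entries out of items_chuku in place, B leaves its arguments
-- untouched.

-- ===== PORT A =====
-- inItems: scan items_chuku for the first element with the same [0], remove it.
-- items[i][0]/item[0]/items[i][2]/item[2] are ported with pyGetD: exact under Pre_bjitems,
-- which guarantees every index the Python performs is in range (it raises IndexError outside).
-- items.remove(items[i]) removes exactly the element found at i (an earlier list equal to it
-- would itself have matched on [0] first), so the port drops the found element.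
def inItemsA (item : List Int) : List (List Int) → Bool × Bool × Option (List Int) × List (List Int)
  | [] => (false, false, none, [])
  | c :: cs =>
    if PySem.List.pyGetD c (0:Int) 0 == PySem.List.pyGetD item (0:Int) 0 then
      (true, PySem.List.pyGetD c (2:Int) 0 == PySem.List.pyGetD item (2:Int) 0, some c, cs)
    else
      let r := inItemsA item cs
      (r.1, r.2.1, r.2.2.1, c :: r.2.2.2)

-- state = (left, equal, notequal, items_chuku); equal is built by A but not returned.
def stepA (st : List (List Int) × List (List Int) × List (List Int) × List (List Int))
    (item : List Int) : List (List Int) × List (List Int) × List (List Int) × List (List Int) :=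
  let r := inItemsA item st.2.2.2
  if r.1 then
    if r.2.1 then (st.1, st.2.1 ++ [item], st.2.2.1, r.2.2.2)
    else (st.1, st.2.1, st.2.2.1 ++ [item] ++ [r.2.2.1.getD []], r.2.2.2)
  else (st.1 ++ [item], st.2.1, st.2.2.1, r.2.2.2)

def bjitems (items : List (List Int)) (items_chuku : List (List Int)) :
    List (List Int) × List (List Int) × List (List Int) :=
  let st := items.foldl stepA ([], [], [], items_chuku)
  (st.1, st.2.2.1, st.2.2.2)

-- ===== PORT B =====
-- the 'while pending' loop: pop (i, w); a key match stops the cursor, otherwise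
-- index.setdefault(w[0], deque()).append((i, w)) = Dict.modify with append.
def advanceB (k : Int) : PySem.Dict Int (List (Int × List Int)) → List (Int × List Int) →
    Option (Int × List Int) × PySem.Dict Int (List (Int × List Int)) × List (Int × List Int)
  | d, [] => (none, d, [])
  | d, (i, w) :: rest =>
    if PySem.List.pyGetD w (0:Int) 0 == k then (some (i, w), d, rest)
    else advanceB k (d.modify (PySem.List.pyGetD w (0:Int) 0) [] (· ++ [(i, w)])) rest

-- state = (index, pending, removed, remaining, left, notequal).  Python's
-- 'q = index.get(k); if q:' treats a missing key and an empty queue alike, so the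
-- port matches 'getD k []' against []; q.popleft() leaves q behind = insert k (tail).
def stepB (st : PySem.Dict Int (List (Int × List Int)) × List (Int × List Int) × List Int × Int × List (List Int) × List (List Int))
    (item : List Int) :
    PySem.Dict Int (List (Int × List Int)) × List (Int × List Int) × List Int × Int × List (List Int) × List (List Int) :=
  if st.2.2.2.1 == 0 then
    (st.1, st.2.1, st.2.2.1, st.2.2.2.1, st.2.2.2.2.1 ++ [item], st.2.2.2.2.2)
  else
    let k := PySem.List.pyGetD item (0:Int) 0
    let fdp : Option (Int × List Int) × PySem.Dict Int (List (Int × List Int)) × List (Int × List Int) :=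
      match st.1.getD k [] with
      | (i, v) :: q => (some (i, v), st.1.insert k q, st.2.1)
      | [] => advanceB k st.1 st.2.1
    match fdp with
    | (none, d', p') => (d', p', st.2.2.1, st.2.2.2.1, st.2.2.2.2.1 ++ [item], st.2.2.2.2.2)
    | (some (i, v), d', p') =>
      let removed' := PySem.Set.add st.2.2.1 i
      let rem' := st.2.2.2.1 - 1
      if PySem.List.pyGetD v (2:Int) 0 != PySem.List.pyGetD item (2:Int) 0 then
        (d', p', removed', rem', st.2.2.2.2.1, st.2.2.2.2.2 ++ [item] ++ [v])
      else (d', p', removed', rem', st.2.2.2.2.1, st.2.2.2.2.2)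

def bjitems_alt (items : List (List Int)) (items_chuku : List (List Int)) :
    List (List Int) × List (List Int) × List (List Int) :=
  let st := items.foldl stepB
    (PySem.Dict.empty, PySem.List.enumerate items_chuku, [], (items_chuku.length : Int), [], [])
  (st.2.2.2.2.1, st.2.2.2.2.2,
   ((PySem.List.enumerate items_chuku).filter
       (fun p => !(PySem.Set.contains st.2.2.1 p.1))).map (·.2))

-- ===== PRECONDITION & SPEC =====
-- Pre_ excludes inputs containing an inner list shorter than the fields the programs compare
-- ([0] on a scanned element, [2] on both sides of a key match), on which A raises IndexError
-- as soon as its scan touches the short list; being a simple shape condition it also drops a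
-- few inputs where the short list is never reached and A returns — B returns A's exact value
-- there too (see cites).
def Pre_bjitems (items : List (List Int)) (items_chuku : List (List Int)) : Prop :=
  items = [] ∨ items_chuku = [] ∨
  ((∀ l ∈ items ++ items_chuku, 1 ≤ l.length) ∧
   ∀ x ∈ items, ∀ y ∈ items_chuku, x.getD 0 0 = y.getD 0 0 → 3 ≤ x.length ∧ 3 ≤ y.length)
instance (items : List (List Int)) (items_chuku : List (List Int)) : Decidable (Pre_bjitems items items_chuku) := by unfold Pre_bjitems; infer_instance

def pvWitness_bjitems : List (List Int) × List (List Int) := ([[1, 2, 3], [7]], [[1, 5, 4], [2, 0, 0]])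

def Spec_bjitems (items : List (List Int)) (items_chuku : List (List Int)) (out : List (List Int) × List (List Int) × List (List Int)) : Prop := out = bjitems_alt items items_chuku
instance (items : List (List Int)) (items_chuku : List (List Int)) (out : List (List Int) × List (List Int) × List (List Int)) : Decidable (Spec_bjitems items items_chuku out) := by unfold Spec_bjitems; infer_instance

-- ===== CLAIM (what is proved, stated in full; the proofs are below) =====
def Claim_equal_bjitems : Prop := ∀ (items : List (List Int)) (items_chuku : List (List Int)), Dom_bjitems items items_chuku → Pre_bjitems items items_chuku → Spec_bjitems items items_chuku (bjitems items items_chuku)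

-- ===== LEMMAS AND PROOFS =====

-- the elements of items_chuku not yet removed, with their original indices
def erem (chuku0 : List (List Int)) (r : List Int) : List (Int × List Int) :=
  (PySem.List.enumerate chuku0).filter (fun p => !(PySem.Set.contains r p.1))
def kp (k : Int) : Int × List Int → Bool := fun p => PySem.List.pyGetD p.2 (0:Int) 0 == k

lemma nodup_fst_erem (chuku0 : List (List Int)) (r : List Int) :
    ((erem chuku0 r).map (·.1)).Nodup := by
  have h := PySem.List.pairwise_lt_enumerate (xs := chuku0) (s := 0)
  have h2 := h.sublist (List.filter_sublist (p := fun p => !(PySem.Set.contains r p.1)))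
  exact List.pairwise_map.mpr (h2.imp (fun hlt => Int.ne_of_lt hlt))

lemma erem_append (chuku0 : List (List Int)) (r : List Int) (i : Int) :
    erem chuku0 (r ++ [i]) = (erem chuku0 r).filter (fun p => !(p.1 == i)) := by
  unfold erem
  rw [List.filter_filter]
  apply List.filter_congr
  intro p _
  by_cases hpi : p.1 = i
  · simp [hpi]
  · simp [hpi]

lemma inItemsA_none (item : List Int) (l : List (Int × List Int))
    (h : l.filter (kp (PySem.List.pyGetD item (0:Int) 0)) = []) :
    inItemsA item (l.map (·.2)) = (false, false, none, l.map (·.2)) := by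
  induction l with
  | nil => simp [inItemsA]
  | cons p l ih =>
    rw [List.filter_cons] at h
    by_cases hk : kp (PySem.List.pyGetD item (0:Int) 0) p
    · simp [hk] at h
    · simp only [hk, if_neg, Bool.false_eq_true, not_false_iff] at h
      have hh : (PySem.List.pyGetD p.2 (0:Int) 0 == PySem.List.pyGetD item (0:Int) 0) = false := by
        simpa [kp] using hk
      simp [inItemsA, hh, ih h]

lemma filter_ne_of_not_mem (l : List (Int × List Int)) (j : Int) (h : j ∉ l.map (·.1)) :
    l.filter (fun p => !(p.1 == j)) = l := by
  apply List.filter_eq_self.mpr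
  intro p hp
  simp only [Bool.not_eq_eq_eq_not, Bool.not_true, beq_eq_false_iff_ne, ne_eq]
  intro he
  exact h (he ▸ List.mem_map_of_mem hp)

lemma inItemsA_some (item : List Int) (l : List (Int × List Int)) (i : Int) (v : List Int)
    (q : List (Int × List Int)) (hnd : (l.map (·.1)).Nodup)
    (h : l.filter (kp (PySem.List.pyGetD item (0:Int) 0)) = (i, v) :: q) :
    inItemsA item (l.map (·.2)) =
      (true, PySem.List.pyGetD v (2:Int) 0 == PySem.List.pyGetD item (2:Int) 0, some v,
       (l.filter (fun p => !(p.1 == i))).map (·.2)) := by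
  induction l with
  | nil => simp at h
  | cons p l ih =>
    obtain ⟨j, w⟩ := p
    simp only [List.map_cons, List.nodup_cons] at hnd
    rw [List.filter_cons] at h
    by_cases hk : kp (PySem.List.pyGetD item (0:Int) 0) (j, w)
    · simp only [hk, ite_true] at h
      obtain ⟨⟨rfl, rfl⟩, _⟩ : ((j, w) = (i, v)) ∧ l.filter _ = q := by
        constructor
        · exact (List.cons.injEq _ _ _ _ ▸ h).1
        · exact (List.cons.injEq _ _ _ _ ▸ h).2
      have hh : (PySem.List.pyGetD v (0:Int) 0 == PySem.List.pyGetD item (0:Int) 0) = true := by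
        simpa [kp] using hk
      simp [inItemsA, hh, filter_ne_of_not_mem l i hnd.1]
    · simp only [hk, Bool.false_eq_true, ite_false] at h
      have hh : (PySem.List.pyGetD w (0:Int) 0 == PySem.List.pyGetD item (0:Int) 0) = false := by
        simpa [kp] using hk
      have hji : (j == i) = false := by
        have hi : i ∈ l.map (·.1) :=
          List.mem_map_of_mem (List.mem_of_mem_filter (h ▸ List.mem_cons_self))
        exact beq_eq_false_iff_ne.mpr (fun he => hnd.1 (he ▸ hi))
      simp [inItemsA, hh, ih hnd.2 h, hji]

lemma filter_comm' (l : List (Int × List Int)) (f g : Int × List Int → Bool) :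
    (l.filter f).filter g = (l.filter g).filter f := by
  rw [List.filter_filter, List.filter_filter]
  exact List.filter_congr (fun a _ => by rw [Bool.and_comm])

lemma filter_kp_remove_self (k : Int) (l : List (Int × List Int)) (i : Int) (v : List Int)
    (q : List (Int × List Int)) (hnd : (l.map (·.1)).Nodup)
    (h : l.filter (kp k) = (i, v) :: q) :
    (l.filter (fun p => !(p.1 == i))).filter (kp k) = q := by
  have hq : (((i, v) :: q).map (·.1)).Nodup := by
    rw [← h]; exact hnd.sublist (List.filter_sublist.map _)
  simp only [List.map_cons, List.nodup_cons] at hq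
  rw [filter_comm', h, List.filter_cons]
  simp [filter_ne_of_not_mem q i hq.1]

lemma filter_kp_remove_other (k k' : Int) (l : List (Int × List Int)) (i : Int) (v : List Int)
    (q : List (Int × List Int)) (hnd : (l.map (·.1)).Nodup)
    (h : l.filter (kp k) = (i, v) :: q) (hne : k' ≠ k) :
    (l.filter (fun p => !(p.1 == i))).filter (kp k') = l.filter (kp k') := by
  have hiv : (i, v) ∈ l.filter (kp k) := h ▸ List.mem_cons_self
  have hivl : (i, v) ∈ l := List.mem_of_mem_filter hiv
  have hkv : kp k (i, v) = true := List.of_mem_filter hiv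
  rw [filter_comm']
  apply List.filter_eq_self.mpr
  intro p hp
  simp only [Bool.not_eq_eq_eq_not, Bool.not_true, beq_eq_false_iff_ne, ne_eq]
  intro he
  have hpl : p ∈ l := List.mem_of_mem_filter hp
  have hpe : p = (i, v) := by
    apply List.inj_on_of_nodup_map hnd hpl hivl
    simpa using he
  have hkp' : kp k' p = true := List.of_mem_filter hp
  rw [hpe] at hkp'
  simp only [kp, beq_iff_eq] at hkp' hkv
  exact hne (hkp' ▸ hkv)

-- removing the (unique) pair with first component i shortens the list by one
lemma length_filter_remove (l : List (Int × List Int)) (i : Int) (v : List Int)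
    (hmem : (i, v) ∈ l) (hnd : (l.map (·.1)).Nodup) :
    (l.filter (fun p => !(p.1 == i))).length + 1 = l.length := by
  induction l with
  | nil => simp at hmem
  | cons p l ih =>
    simp only [List.map_cons, List.nodup_cons] at hnd
    rcases List.mem_cons.mp hmem with he | hm
    · subst he
      rw [List.filter_cons]
      simp [filter_ne_of_not_mem l i hnd.1]
    · have hi : i ∈ l.map (·.1) := List.mem_map_of_mem hm
      have hpi : (p.1 == i) = false := beq_eq_false_iff_ne.mpr (fun he => hnd.1 (he ▸ hi))
      rw [List.filter_cons]
      simp only [hpi, Bool.not_false, ite_true, List.length_cons]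
      rw [← ih hm hnd.2]

-- characterisation of the cursor loop: scanning 'pend' with accumulated buckets for 'l1'
lemma advanceB_spec (k : Int) (pend : List (Int × List Int)) :
    ∀ (d : PySem.Dict Int (List (Int × List Int))) (l1 : List (Int × List Int))
      (res : Option (Int × List Int)) (d' : PySem.Dict Int (List (Int × List Int)))
      (pend' : List (Int × List Int)),
      advanceB k d pend = (res, d', pend') →
      (∀ k', d.getD k' [] = l1.filter (kp k')) →
      l1.filter (kp k) = [] →
      (res = none ∧ pend' = [] ∧ (l1 ++ pend).filter (kp k) = [] ∧
        (∀ k', d'.getD k' [] = (l1 ++ pend).filter (kp k'))) ∨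
      (∃ i v l1', res = some (i, v) ∧
        l1 ++ pend = l1' ++ (i, v) :: pend' ∧
        kp k (i, v) = true ∧ l1'.filter (kp k) = [] ∧
        (∀ k', d'.getD k' [] = l1'.filter (kp k'))) := by
  induction pend with
  | nil =>
    intro d l1 res d' pend' heq hinv hfilt
    simp only [advanceB, Prod.mk.injEq] at heq
    obtain ⟨rfl, rfl, rfl⟩ := heq
    left
    exact ⟨rfl, rfl, by simpa using hfilt, by simpa using hinv⟩
  | cons p rest ih =>
    intro d l1 res d' pend' heq hinv hfilt
    obtain ⟨j, w⟩ := p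
    by_cases hk : (PySem.List.pyGetD w (0:Int) 0 == k) = true
    · simp only [advanceB, hk, ite_true, Prod.mk.injEq] at heq
      obtain ⟨rfl, rfl, rfl⟩ := heq
      right
      exact ⟨j, w, l1, rfl, rfl, by simpa [kp] using hk, hfilt, hinv⟩
    · simp only [advanceB, hk] at heq
      have hinv2 : ∀ k', (d.modify (PySem.List.pyGetD w (0:Int) 0) [] (· ++ [(j, w)])).getD k' []
          = (l1 ++ [(j, w)]).filter (kp k') := by
        intro k'
        rw [List.filter_append, List.filter_cons]
        by_cases hkk : k' = PySem.List.pyGetD w (0:Int) 0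
        · subst hkk
          rw [PySem.Dict.getD_modify_self, hinv]
          simp [kp]
        · rw [PySem.Dict.getD_modify_of_ne d _ _ hkk, hinv]
          have : kp k' (j, w) = false := by
            simp only [kp, beq_eq_false_iff_ne, ne_eq]
            exact fun he => hkk he.symm
          simp [this]
      have hfilt2 : (l1 ++ [(j, w)]).filter (kp k) = [] := by
        rw [List.filter_append, hfilt]
        have : kp k (j, w) = false := by simpa [kp] using hk
        simp [this]
      rcases ih _ (l1 ++ [(j, w)]) res d' pend' heq hinv2 hfilt2 with
        ⟨h1, h2, h3, h4⟩ | ⟨i, v, l1', h1, h2, h3, h4, h5⟩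
      · left
        refine ⟨h1, h2, ?_, ?_⟩
        · simpa using h3
        · intro k'; have := h4 k'; simpa using this
      · right
        exact ⟨i, v, l1', h1, by simpa using h2, h3, h4, h5⟩

-- main loop invariant: A's surviving chuku list is l1 ++ pend (indexed part ++ cursor
-- suffix), the dict holds exactly the indexed part bucketed by key, rem counts survivors
lemma loop_eq (chuku0 : List (List Int)) :
    ∀ (its : List (List Int)) (r : List Int)
      (d : PySem.Dict Int (List (Int × List Int))) (pend l1 : List (Int × List Int))
      (rem : Int) (left eq ne : List (List Int)),
      erem chuku0 r = l1 ++ pend →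
      (∀ k, d.getD k [] = l1.filter (kp k)) →
      rem = ((l1.length + pend.length : Nat) : Int) →
      (its.foldl stepA (left, eq, ne, (erem chuku0 r).map (·.2))).1
          = (its.foldl stepB (d, pend, r, rem, left, ne)).2.2.2.2.1 ∧
      (its.foldl stepA (left, eq, ne, (erem chuku0 r).map (·.2))).2.2.1
          = (its.foldl stepB (d, pend, r, rem, left, ne)).2.2.2.2.2 ∧
      (its.foldl stepA (left, eq, ne, (erem chuku0 r).map (·.2))).2.2.2
          = (erem chuku0 (its.foldl stepB (d, pend, r, rem, left, ne)).2.2.1).map (·.2) := by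
  intro its
  induction its with
  | nil => intro r d pend l1 rem left eq ne hdec hinv hrem; exact ⟨rfl, rfl, rfl⟩
  | cons item its ih =>
    intro r d pend l1 rem left eq ne hdec hinv hrem
    simp only [List.foldl_cons]
    have hnd : ((l1 ++ pend).map (·.1)).Nodup := hdec ▸ nodup_fst_erem chuku0 r
    by_cases hrem0 : rem = 0
    · -- nothing survives: both sides push to left
      have hlp : l1 = [] ∧ pend = [] := by
        rw [hrem0] at hrem
        constructor <;> [skip; skip] <;>
          (apply List.eq_nil_of_length_eq_zero; omega)
      obtain ⟨rfl, rfl⟩ := hlp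
      have hA : stepA (left, eq, ne, (erem chuku0 r).map (·.2))
          item = (left ++ [item], eq, ne, (erem chuku0 r).map (·.2)) := by
        have h0 : erem chuku0 r = [] := by simpa using hdec
        simp [stepA, h0, inItemsA]
      have hB : stepB (d, [], r, rem, left, ne) item = (d, [], r, rem, left ++ [item], ne) := by
        simp [stepB, hrem0]
      rw [hA, hB]
      exact ih r d [] [] rem (left ++ [item]) eq ne hdec hinv hrem
    · have hremne : (rem == 0) = false := by simpa using hrem0
      set k := PySem.List.pyGetD item (0:Int) 0 with hk
      cases hq : d.getD k [] with
      | cons p q =>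
        -- hit in the index: pop the queue head
        obtain ⟨i, v⟩ := p
        have hl1f : l1.filter (kp k) = (i, v) :: q := by rw [← hinv k, hq]
        have hfull : (l1 ++ pend).filter (kp k) = (i, v) :: (q ++ pend.filter (kp k)) := by
          rw [List.filter_append, hl1f]; rfl
        have hA := inItemsA_some item (l1 ++ pend) i v (q ++ pend.filter (kp k)) hnd
            (by rw [← hk]; exact hfull)
        have hivl1 : (i, v) ∈ l1 := List.mem_of_mem_filter (hl1f ▸ List.mem_cons_self)
        have hndl1 : (l1.map (·.1)).Nodup := by
          rw [List.map_append] at hnd; exact hnd.of_append_left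
        have hinotpend : i ∉ pend.map (·.1) := by
          rw [List.map_append] at hnd
          exact fun hm => (List.disjoint_of_nodup_append hnd) (List.mem_map_of_mem hivl1) hm
        have hremove : (l1 ++ pend).filter (fun p => !(p.1 == i))
            = l1.filter (fun p => !(p.1 == i)) ++ pend := by
          rw [List.filter_append, filter_ne_of_not_mem pend i hinotpend]
        have hir : i ∉ r := by
          have : (i, v) ∈ erem chuku0 r := hdec ▸ List.mem_append_left _ hivl1
          have := List.of_mem_filter this
          simpa using this
        have hset : PySem.Set.add r i = r ++ [i] := PySem.Set.add_of_not_mem hir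
        have hdec' : erem chuku0 (r ++ [i]) = l1.filter (fun p => !(p.1 == i)) ++ pend := by
          rw [erem_append, hdec, hremove]
        have hinv' : ∀ k', (d.insert k q).getD k' []
            = (l1.filter (fun p => !(p.1 == i))).filter (kp k') := by
          intro k'
          by_cases hkk : k' = k
          · subst hkk
            rw [PySem.Dict.getD_insert_self, filter_kp_remove_self _ _ i v q hndl1 hl1f]
          · rw [PySem.Dict.getD_insert_of_ne d q [] hkk,
                filter_kp_remove_other _ k' _ i v q hndl1 hl1f hkk, hinv k']
        have hrem' : rem - 1
            = (((l1.filter (fun p => !(p.1 == i))).length + pend.length : Nat) : Int) := by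
          have := length_filter_remove l1 i v hivl1 hndl1
          rw [hrem]; push_cast; omega
        by_cases heq2 : PySem.List.pyGetD v (2:Int) 0 = PySem.List.pyGetD item (2:Int) 0
        · have hA' : stepA (left, eq, ne, (erem chuku0 r).map (·.2)) item
              = (left, eq ++ [item], ne, (erem chuku0 (r ++ [i])).map (·.2)) := by
            simp only [stepA, hdec, List.map_append]
            rw [← List.map_append, hA]
            simp [heq2, hremove, hdec', List.map_append]
          have hB' : stepB (d, pend, r, rem, left, ne) item
              = (d.insert k q, pend, r ++ [i], rem - 1, left, ne) := by
            simp [stepB, hremne, ← hk, hq, heq2, hset]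
          rw [hA', hB']
          exact ih (r ++ [i]) _ pend _ (rem - 1) left (eq ++ [item]) ne hdec' hinv' hrem'
        · have hA' : stepA (left, eq, ne, (erem chuku0 r).map (·.2)) item
              = (left, eq, ne ++ [item] ++ [v], (erem chuku0 (r ++ [i])).map (·.2)) := by
            simp only [stepA, hdec, List.map_append]
            rw [← List.map_append, hA]
            simp [heq2, hremove, hdec', List.map_append]
          have hB' : stepB (d, pend, r, rem, left, ne) item
              = (d.insert k q, pend, r ++ [i], rem - 1, left, ne ++ [item] ++ [v]) := by
            simp [stepB, hremne, ← hk, hq, heq2, hset]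
          rw [hA', hB']
          exact ih (r ++ [i]) _ pend _ (rem - 1) left eq (ne ++ [item] ++ [v]) hdec' hinv' hrem'
      | nil =>
        -- miss in the index: advance the cursor
        have hl1f : l1.filter (kp k) = [] := by rw [← hinv k, hq]
        rcases advanceB_spec k pend d l1 (advanceB k d pend).1 (advanceB k d pend).2.1
            (advanceB k d pend).2.2 rfl hinv hl1f with
          ⟨h1, h2, h3, h4⟩ | ⟨i, v, l1', h1, h2, h3, h4, h5⟩
        · -- no match anywhere
          have hA' : stepA (left, eq, ne, (erem chuku0 r).map (·.2)) item
              = (left ++ [item], eq, ne, (erem chuku0 r).map (·.2)) := by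
            have hA := inItemsA_none item (l1 ++ pend) (by rw [← hk]; exact h3)
            simp only [stepA, hdec, List.map_append]
            rw [← List.map_append, hA]
            simp [List.map_append]
          have hB' : stepB (d, pend, r, rem, left, ne) item
              = ((advanceB k d pend).2.1, (advanceB k d pend).2.2, r, rem, left ++ [item], ne) := by
            simp only [stepB, hremne, Bool.false_eq_true, ite_false, ← hk, hq]
            rw [show advanceB k d pend
                = (none, (advanceB k d pend).2.1, (advanceB k d pend).2.2) from by
              rw [← h1]]
          rw [hA', hB']
          have hdec2 : erem chuku0 r = (l1 ++ pend) ++ (advanceB k d pend).2.2 := by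
            rw [h2, List.append_nil]; exact hdec
          refine ih r _ _ (l1 ++ pend) rem (left ++ [item]) eq ne hdec2 h4 ?_
          rw [hrem, h2]; push_cast; simp
        · -- the cursor finds the first match at (i, v)
          have hfull : (l1 ++ pend).filter (kp k)
              = (i, v) :: ((advanceB k d pend).2.2.filter (kp k)) := by
            rw [h2, List.filter_append, h4, List.filter_cons]
            simp [h3]
          have hA := inItemsA_some item (l1 ++ pend) i v ((advanceB k d pend).2.2.filter (kp k)) hnd
              (by rw [← hk]; exact hfull)
          have hnd2 : ((l1' ++ (i, v) :: (advanceB k d pend).2.2).map (·.1)).Nodup := h2 ▸ hnd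
          have hivl : (i, v) ∈ l1 ++ pend := h2 ▸ List.mem_append_right _ List.mem_cons_self
          have hremove : (l1 ++ pend).filter (fun p => !(p.1 == i))
              = l1' ++ (advanceB k d pend).2.2 := by
            rw [h2]
            rw [List.map_append, List.map_cons] at hnd2
            have hnl : i ∉ l1'.map (·.1) := fun hm =>
              (List.disjoint_of_nodup_append hnd2) hm List.mem_cons_self
            have hnr : i ∉ (advanceB k d pend).2.2.map (·.1) :=
              (List.nodup_cons.mp (List.nodup_append.mp hnd2).2.1).1
            rw [List.filter_append, List.filter_cons, filter_ne_of_not_mem _ _ hnl]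
            simp only [beq_self_eq_true, Bool.not_true, Bool.false_eq_true, ite_false]
            rw [filter_ne_of_not_mem _ _ hnr]
          have hir : i ∉ r := by
            have : (i, v) ∈ erem chuku0 r := hdec ▸ hivl
            have := List.of_mem_filter this
            simpa using this
          have hset : PySem.Set.add r i = r ++ [i] := PySem.Set.add_of_not_mem hir
          have hdec' : erem chuku0 (r ++ [i]) = l1' ++ (advanceB k d pend).2.2 := by
            rw [erem_append, hdec, hremove]
          have hrem' : rem - 1
              = ((l1'.length + (advanceB k d pend).2.2.length : Nat) : Int) := by
            have hlen : l1.length + pend.length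
                = l1'.length + ((advanceB k d pend).2.2.length + 1) := by
              have := congrArg List.length h2
              simpa [List.length_append] using this
            rw [hrem]; push_cast; omega
          have hBpre : stepB (d, pend, r, rem, left, ne) item
              = (match advanceB k d pend with
                 | (none, d', p') => (d', p', r, rem, left ++ [item], ne)
                 | (some (i, v), d', p') =>
                   if PySem.List.pyGetD v (2:Int) 0 != PySem.List.pyGetD item (2:Int) 0 then
                     (d', p', PySem.Set.add r i, rem - 1, left, ne ++ [item] ++ [v])
                   else (d', p', PySem.Set.add r i, rem - 1, left, ne)) := by
            simp [stepB, hremne, ← hk, hq]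
          have hadveq : advanceB k d pend
              = (some (i, v), (advanceB k d pend).2.1, (advanceB k d pend).2.2) := by
            rw [← h1]
          by_cases heq2 : PySem.List.pyGetD v (2:Int) 0 = PySem.List.pyGetD item (2:Int) 0
          · have hA' : stepA (left, eq, ne, (erem chuku0 r).map (·.2)) item
                = (left, eq ++ [item], ne, (erem chuku0 (r ++ [i])).map (·.2)) := by
              simp only [stepA, hdec, List.map_append]
              rw [← List.map_append, hA]
              simp [heq2, hremove, hdec', List.map_append]
            have hB' : stepB (d, pend, r, rem, left, ne) item
                = ((advanceB k d pend).2.1, (advanceB k d pend).2.2, r ++ [i], rem - 1, left, ne) := by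
              rw [hBpre, hadveq]
              simp [heq2, hset]
            rw [hA', hB']
            exact ih (r ++ [i]) _ _ l1' (rem - 1) left (eq ++ [item]) ne hdec' h5 hrem'
          · have hA' : stepA (left, eq, ne, (erem chuku0 r).map (·.2)) item
                = (left, eq, ne ++ [item] ++ [v], (erem chuku0 (r ++ [i])).map (·.2)) := by
              simp only [stepA, hdec, List.map_append]
              rw [← List.map_append, hA]
              simp [heq2, hremove, hdec', List.map_append]
            have hB' : stepB (d, pend, r, rem, left, ne) item
                = ((advanceB k d pend).2.1, (advanceB k d pend).2.2, r ++ [i], rem - 1, left,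
                   ne ++ [item] ++ [v]) := by
              rw [hBpre, hadveq]
              simp [heq2, hset]
            rw [hA', hB']
            exact ih (r ++ [i]) _ _ l1' (rem - 1) left eq (ne ++ [item] ++ [v]) hdec' h5 hrem'

-- ===== VERDICT (by name: the statement is the Claim_ definition above) =====
theorem bjitems_spec : Claim_equal_bjitems := by
  intro items chuku _ _
  unfold Spec_bjitems bjitems bjitems_alt
  have hdec : erem chuku [] = [] ++ PySem.List.enumerate chuku := by
    simp [erem]
  have hinv : ∀ k, (PySem.Dict.empty : PySem.Dict Int (List (Int × List Int))).getD k []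
      = List.filter (kp k) [] := by
    intro k; rfl
  have hrem : (chuku.length : Int)
      = ((([] : List (Int × List Int)).length + (PySem.List.enumerate chuku).length : Nat) : Int) := by
    simp [PySem.List.length_enumerate]
  have h := loop_eq chuku items [] PySem.Dict.empty (PySem.List.enumerate chuku) []
      (chuku.length : Int) [] [] [] hdec hinv hrem
  have h0 : (erem chuku []).map (·.2) = chuku := by
    simp [erem, PySem.List.map_snd_enumerate]
  rw [h0] at h
  obtain ⟨h1, h2, h3⟩ := h
  refine Prod.ext h1 (Prod.ext h2 ?_)
  rw [h3]
  rfl
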